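-- pv_equiv track=rewrite | github.com/HOONTP/TIL | pythonP/swea/23_베이비진runtriplet.py | check
-- ===== SOURCE A (Python) =====
-- def check(arr):
--     arr.sort()
--     arr_set = set(arr)
--     arr_set = sorted(arr_set) # 1 2 2 3 의 경우 연속인지 확인이 어렵다 그래서 set으로 중복 제거
--     for i in range(len(arr)-2):
--         if arr[i] == arr[i+1] and arr[i+1] == arr[i+2]:
--             return True
--     for i in range(len(arr_set)-2):
--         if arr_set[i]+2 == arr_set[i+1]+1 == arr_set[i+2]:
--             return True
--     else:
--         return False
-- ===== SOURCE B (Python) =====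
-- def check(arr):
--     arr.sort()  # kept: A sorts arr in place and the caller can observe that
--     counts = {}
--     for x in arr:
--         counts[x] = counts.get(x, 0) + 1
--     if any(c >= 3 for c in counts.values()):
--         return True
--     s = set(counts)
--     return any(x + 1 in s and x + 2 in s for x in s)
-- ===== Notes on version B (the rewrite author's own statement) =====
-- stated objective: idiomatic
-- what changed: Replaces both sliding-window scans over the sorted list / sorted set with a frequency dict (any count >= 3) and set membership tests (x, x+1, x+2 all present); arr.sort() is kept only for the in-place mutation side effect.
import Mathlib
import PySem

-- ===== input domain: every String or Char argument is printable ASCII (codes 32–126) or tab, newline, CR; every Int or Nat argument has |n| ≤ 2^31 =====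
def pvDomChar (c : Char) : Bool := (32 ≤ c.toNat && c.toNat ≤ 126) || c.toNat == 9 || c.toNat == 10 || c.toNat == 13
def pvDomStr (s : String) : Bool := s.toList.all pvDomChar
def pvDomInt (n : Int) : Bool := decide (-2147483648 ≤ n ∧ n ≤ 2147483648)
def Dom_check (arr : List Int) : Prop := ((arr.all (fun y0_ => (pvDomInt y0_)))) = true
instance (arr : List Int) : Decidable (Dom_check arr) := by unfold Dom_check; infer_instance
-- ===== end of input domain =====

-- B replaces A's two sliding-window scans by a frequency dict (some count ≥ 3) and set
-- membership tests (x, x+1, x+2 all present). Both Pythons sort arr in place (side effect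
-- kept in B); the equivalence proved here is about the RETURN value.

-- ===== PORT A =====
def check (arr : List Int) : Bool :=
  let arrS := PySem.List.sorted arr (fun x => x) false
  let arrSet := PySem.Set.ofList arrS
  let arrSet2 := PySem.List.sorted arrSet (fun x => x) false
  if (PySem.List.pyRange 0 ((arrS.length : Int) - 2) 1).any (fun i =>
        PySem.List.pyGetD arrS i 0 == PySem.List.pyGetD arrS (i+1) 0 &&
        PySem.List.pyGetD arrS (i+1) 0 == PySem.List.pyGetD arrS (i+2) 0)
  then true
  else
    (PySem.List.pyRange 0 ((arrSet2.length : Int) - 2) 1).any (fun i =>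
        PySem.List.pyGetD arrSet2 i 0 + 2 == PySem.List.pyGetD arrSet2 (i+1) 0 + 1 &&
        PySem.List.pyGetD arrSet2 (i+1) 0 + 1 == PySem.List.pyGetD arrSet2 (i+2) 0)

-- ===== PORT B =====
def check_alt (arr : List Int) : Bool :=
  let arrS := PySem.List.sorted arr (fun x => x) false
  let counts := arrS.foldl (fun d x => d.insert x (d.getD x 0 + 1)) PySem.Dict.empty
  if counts.values.any (fun c => decide ((3 : Int) ≤ c)) then true
  else
    let s := PySem.Set.ofList counts.keys
    s.any (fun x => PySem.Set.contains s (x + 1) && PySem.Set.contains s (x + 2))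

-- ===== PRECONDITION & SPEC =====
def Spec_check (arr : List Int) (out : Bool) : Prop := out = check_alt arr
instance (arr : List Int) (out : Bool) : Decidable (Spec_check arr out) := by unfold Spec_check; infer_instance

-- ===== CLAIM (what is proved, stated in full; the proofs are below) =====
def Claim_equal_check : Prop := ∀ (arr : List Int), Dom_check arr → Spec_check arr (check arr)

-- ===== LEMMAS AND PROOFS =====

-- a width-3 sliding window with early return, as structural recursion
def win3 (f : Int → Int → Int → Bool) : List Int → Bool
  | a :: b :: c :: t => f a b c || win3 f (b :: c :: t)
  | _ => false

theorem win3_eq (f : Int → Int → Int → Bool) (l : List Int) :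
    (List.range (l.length - 2)).any
      (fun k => f (l.getD k 0) (l.getD (k+1) 0) (l.getD (k+2) 0)) = win3 f l := by
  induction l with
  | nil => simp [win3]
  | cons a t ih =>
    match t with
    | [] => simp [win3]
    | [b] => simp [win3]
    | b :: c :: u =>
      have hlen : (a::b::c::u).length - 2 = u.length + 1 := by simp
      rw [hlen, List.range_succ_eq_map, List.any_cons, List.any_map]
      have hlen2 : (b::c::u).length - 2 = u.length := by simp
      rw [hlen2] at ih
      simp only [Function.comp_def, Nat.succ_eq_add_one, List.getD_cons_zero,
        List.getD_cons_succ, win3]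
      rw [← ih]
      exact congrArg (f a b c || ·) (List.any_congr rfl (fun k =>
        by simp [show k + 2 = (k + 1) + 1 from rfl]))

theorem scan_eq_win3 (f : Int → Int → Int → Bool) (l : List Int) :
    (PySem.List.pyRange 0 ((l.length : Int) - 2) 1).any (fun i =>
      f (PySem.List.pyGetD l i 0) (PySem.List.pyGetD l (i+1) 0) (PySem.List.pyGetD l (i+2) 0))
    = win3 f l := by
  rw [PySem.List.pyRange_one, List.any_map,
    show ((l.length : Int) - 2 - 0).toNat = l.length - 2 from by omega, ← win3_eq f l]
  refine List.any_congr rfl (fun k => ?_)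
  have e1 : (0 : Int) + (k : Int) = ((k : Nat) : Int) := zero_add _
  have e2 : (k : Int) + 1 = ((k + 1 : Nat) : Int) := by push_cast; ring
  have e3 : (k : Int) + 2 = ((k + 2 : Nat) : Int) := by push_cast; ring
  simp only [Function.comp_def, e1, e2, e3, PySem.List.pyGetD_natCast]

theorem win3_cons (f : Int → Int → Int → Bool) (a : Int) (t : List Int)
    (h : win3 f t = true) : win3 f (a :: t) = true := by
  match t with
  | [] => simp [win3] at h
  | [b] => simp [win3] at h
  | b :: c :: u => simp [win3] at h ⊢; tauto

theorem head_eq_of_le {l : List Int} {y : Int} {R : Int → Int → Prop}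
    (hR : ∀ a b, R a b → a ≤ b) (hp : l.Pairwise R) (hy : y ∈ l)
    (hle : ∀ z ∈ l, y ≤ z) : ∃ t, l = y :: t := by
  match l with
  | [] => simp at hy
  | a :: t =>
    rcases List.mem_cons.1 hy with h | h
    · exact ⟨t, by rw [h]⟩
    · have h1 : a ≤ y := hR _ _ ((List.pairwise_cons.1 hp).1 _ h)
      have h2 : y ≤ a := hle a (List.mem_cons_self ..)
      exact ⟨t, by rw [le_antisymm h1 h2]⟩

theorem triple_iff (l : List Int) (hp : l.Pairwise (· ≤ ·)) :
    win3 (fun a b c => a == b && b == c) l = true ↔ ∃ x ∈ l, 3 ≤ l.count x := by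
  constructor
  · intro h
    clear hp
    induction l with
    | nil => simp [win3] at h
    | cons a t ih =>
      match t with
      | [] => simp [win3] at h
      | [b] => simp [win3] at h
      | b :: c :: u =>
        simp only [win3, Bool.or_eq_true, Bool.and_eq_true, beq_iff_eq] at h
        rcases h with ⟨h1, h2⟩ | h
        · subst h1; subst h2
          exact ⟨a, by simp, by simp⟩
        · rcases ih h with ⟨x, hx, hc⟩
          refine ⟨x, List.mem_cons_of_mem a hx, ?_⟩
          have : (b::c::u).count x ≤ (a::b::c::u).count x :=
            (List.sublist_cons_self a _).count_le x
          omega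
  · rintro ⟨x, hx, hc⟩
    induction l with
    | nil => simp at hx
    | cons a t ih =>
      by_cases hax : x = a
      · subst hax
        have hct : 2 ≤ t.count x := by rw [List.count_cons_self] at hc; omega
        have hle : ∀ z ∈ t, x ≤ z := (List.pairwise_cons.1 hp).1
        obtain ⟨t1, ht1⟩ := head_eq_of_le (fun _ _ h => h) (List.pairwise_cons.1 hp).2
          (List.count_pos_iff.1 (by omega)) hle
        subst ht1
        have hct1 : 1 ≤ t1.count x := by rw [List.count_cons_self] at hct; omega
        have hp1 := (List.pairwise_cons.1 hp).2
        have hle1 : ∀ z ∈ t1, x ≤ z := fun z hz => (List.pairwise_cons.1 hp1).1 z hz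
        obtain ⟨t2, ht2⟩ := head_eq_of_le (fun _ _ h => h) (List.pairwise_cons.1 hp1).2
          (List.count_pos_iff.1 (by omega)) hle1
        subst ht2
        simp [win3]
      · have hxt : x ∈ t := by rcases List.mem_cons.1 hx with h|h; exact absurd h hax; exact h
        have hct : 3 ≤ t.count x := by
          rw [List.count_cons] at hc
          simp [Ne.symm hax] at hc
          omega
        exact win3_cons _ a t (ih (List.pairwise_cons.1 hp).2 hxt hct)

theorem run_iff (l : List Int) (hp : l.Pairwise (· < ·)) :
    win3 (fun a b c => a + 2 == b + 1 && b + 1 == c) l = true ↔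
      ∃ x ∈ l, x + 1 ∈ l ∧ x + 2 ∈ l := by
  constructor
  · intro h
    clear hp
    induction l with
    | nil => simp [win3] at h
    | cons a t ih =>
      match t with
      | [] => simp [win3] at h
      | [b] => simp [win3] at h
      | b :: c :: u =>
        simp only [win3, Bool.or_eq_true, Bool.and_eq_true, beq_iff_eq] at h
        rcases h with ⟨h1, h2⟩ | h
        · refine ⟨a, by simp, ?_, ?_⟩
          · have : b = a + 1 := by omega
            simp [this]
          · have : c = a + 2 := by omega
            simp [this]
        · rcases ih h with ⟨x, hx, h1, h2⟩
          exact ⟨x, List.mem_cons_of_mem a hx, List.mem_cons_of_mem a h1,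
            List.mem_cons_of_mem a h2⟩
  · rintro ⟨x, hx, h1, h2⟩
    induction l with
    | nil => simp at hx
    | cons a t ih =>
      have hpt := (List.pairwise_cons.1 hp).2
      have hlt := (List.pairwise_cons.1 hp).1
      by_cases hax : x = a
      · subst hax
        have h1t : x + 1 ∈ t := by
          rcases List.mem_cons.1 h1 with h | h
          · omega
          · exact h
        obtain ⟨t1, ht1⟩ := head_eq_of_le (R := (· < ·)) (fun _ _ h => le_of_lt h) hpt h1t
          (fun z hz => by have := hlt z hz; omega)
        subst ht1
        have hpt1 := (List.pairwise_cons.1 hpt).2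
        have hlt1 := (List.pairwise_cons.1 hpt).1
        have h2t : x + 2 ∈ t1 := by
          rcases List.mem_cons.1 h2 with h | h
          · omega
          · rcases List.mem_cons.1 h with h | h
            · omega
            · exact h
        obtain ⟨t2, ht2⟩ := head_eq_of_le (R := (· < ·)) (fun _ _ h => le_of_lt h) hpt1 h2t
          (fun z hz => by have := hlt1 z hz; omega)
        subst ht2
        simp [win3]
        omega
      · have hxt : x ∈ t := by
          rcases List.mem_cons.1 hx with h | h; exact absurd h hax; exact h
        have hgt : ∀ z : Int, z ∈ t → a < z := hlt
        have h1t : x + 1 ∈ t := by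
          rcases List.mem_cons.1 h1 with h | h
          · exfalso; have := hgt x hxt; omega
          · exact h
        have h2t : x + 2 ∈ t := by
          rcases List.mem_cons.1 h2 with h | h
          · exfalso; have := hgt x hxt; omega
          · exact h
        exact win3_cons _ a t (ih hpt hxt h1t h2t)

theorem check_iff (arr : List Int) :
    check arr = true ↔
      (∃ x ∈ arr, 3 ≤ arr.count x) ∨ (∃ x ∈ arr, x + 1 ∈ arr ∧ x + 2 ∈ arr) := by
  simp only [check]
  have hperm := PySem.List.sorted_perm arr (fun x => x) false
  set sa := PySem.List.sorted arr (fun x => x) false with hsa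
  set ss := PySem.List.sorted (PySem.Set.ofList sa) (fun x => x) false with hss
  rw [scan_eq_win3 (fun a b c => a == b && b == c) sa,
      scan_eq_win3 (fun a b c => a + 2 == b + 1 && b + 1 == c) ss]
  have hmem : ∀ z : Int, z ∈ ss ↔ z ∈ arr := by
    intro z
    rw [hss, PySem.List.mem_sorted, PySem.Set.mem_ofList, ← hperm.mem_iff]
  have hT : win3 (fun a b c => a == b && b == c) sa = true ↔
      (∃ x ∈ arr, 3 ≤ arr.count x) := by
    rw [triple_iff sa (PySem.List.sorted_pairwise arr (fun x => x))]
    exact ⟨fun ⟨x, h1, h2⟩ => ⟨x, hperm.mem_iff.1 h1, by rw [← hperm.count_eq]; exact h2⟩,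
      fun ⟨x, h1, h2⟩ => ⟨x, hperm.mem_iff.2 h1, by rw [hperm.count_eq]; exact h2⟩⟩
  have hR : win3 (fun a b c => a + 2 == b + 1 && b + 1 == c) ss = true ↔
      (∃ x ∈ arr, x + 1 ∈ arr ∧ x + 2 ∈ arr) := by
    rw [run_iff ss (by rw [hss]; exact PySem.List.sorted_ofList_pairwise_lt sa)]
    simp only [hmem]
  cases h1 : win3 (fun a b c => a == b && b == c) sa with
  | true => simp only [if_true, true_iff]; exact Or.inl (hT.1 h1)
  | false =>
    simp only [Bool.false_eq_true, if_false]
    rw [hR]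
    exact ⟨Or.inr, fun h => h.elim (fun h' => absurd (hT.2 h') (by simp [h1])) id⟩

theorem check_alt_iff (arr : List Int) :
    check_alt arr = true ↔
      (∃ x ∈ arr, 3 ≤ arr.count x) ∨ (∃ x ∈ arr, x + 1 ∈ arr ∧ x + 2 ∈ arr) := by
  simp only [check_alt]
  have hperm := PySem.List.sorted_perm arr (fun x => x) false
  set sa := PySem.List.sorted arr (fun x => x) false with hsa
  rw [PySem.Dict.foldl_insert_getD_add_one_eq_counter]
  have hkeys : PySem.Set.ofList (PySem.Dict.counter sa).keys = PySem.Set.ofList sa := by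
    rw [PySem.Dict.keys_counter,
      PySem.Set.ofList_eq_self_of_nodup _ (PySem.Set.nodup_ofList sa)]
  have hT : ((PySem.Dict.counter sa).values.any (fun c => decide ((3 : Int) ≤ c)) = true) ↔
      (∃ x ∈ arr, 3 ≤ arr.count x) := by
    have hvals : (PySem.Dict.counter sa).values
        = (PySem.Set.ofList sa).map (fun k => ((sa.count k : Int))) := by
      simp [PySem.Dict.values, PySem.Dict.items_counter, List.map_map, Function.comp_def]
    rw [hvals, List.any_map]
    simp only [List.any_eq_true, Function.comp_def, decide_eq_true_eq,
      PySem.Set.mem_ofList]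
    constructor
    · rintro ⟨x, hx, hc⟩
      exact ⟨x, hperm.mem_iff.1 hx, by rw [← hperm.count_eq]; exact_mod_cast hc⟩
    · rintro ⟨x, hx, hc⟩
      exact ⟨x, hperm.mem_iff.2 hx, by rw [hperm.count_eq]; exact_mod_cast hc⟩
  have hmem : ∀ z : Int, z ∈ PySem.Set.ofList sa ↔ z ∈ arr := by
    intro z; rw [PySem.Set.mem_ofList, hperm.mem_iff]
  have hR : ((PySem.Set.ofList sa).any (fun x =>
        PySem.Set.contains (PySem.Set.ofList sa) (x + 1) &&
        PySem.Set.contains (PySem.Set.ofList sa) (x + 2)) = true) ↔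
      (∃ x ∈ arr, x + 1 ∈ arr ∧ x + 2 ∈ arr) := by
    simp only [List.any_eq_true, Bool.and_eq_true, PySem.Set.contains, List.contains_iff_mem,
      hmem]
  rw [hkeys]
  cases h1 : (PySem.Dict.counter sa).values.any (fun c => decide ((3 : Int) ≤ c)) with
  | true => simp only [if_true, true_iff]; exact Or.inl (hT.1 h1)
  | false =>
    simp only [Bool.false_eq_true, if_false]
    rw [hR]
    exact ⟨Or.inr, fun h => h.elim (fun h' => absurd (hT.2 h') (by simp [h1])) id⟩

-- ===== VERDICT (by name: the statement is the Claim_ definition above) =====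
theorem check_spec : Claim_equal_check := by
  intro arr _
  unfold Spec_check
  rw [Bool.eq_iff_iff, check_iff, check_alt_iff]
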